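-- pv_equiv track=rewrite | github.com/kevindtbd/overplanned | scripts/bend_canary_report.py | _flag_label
-- ===== SOURCE A (Python) =====
-- def _flag_label(flags: list[str]) -> str:
--     """Return the header label for a node based on its flags."""
--     if any("CHAIN LEAKAGE" in f for f in flags):
--         return "FLAG: CHAIN LEAKED"
--     if any("TOURIST TRAP" in f for f in flags):
--         return "FLAG: POSSIBLE TOURIST TRAP"
--     if any("OVERRATED" in f for f in flags):
--         return "FLAG: OVERRATED SIGNAL"
--     if any("LOW CONFIDENCE" in f for f in flags):
--         return "LOW CONFIDENCE"
--     return "HIGH CONFIDENCE"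
-- ===== SOURCE B (Python) =====
-- def _match_rank(f, keywords):
--     """Index of the first (highest-priority) keyword contained in f, or len(keywords)."""
--     for i, kw in enumerate(keywords):
--         if kw in f:
--             return i
--     return len(keywords)
--
--
-- def _flag_label(flags: list[str]) -> str:
--     """Return the header label for a node based on its flags (single pass over flags)."""
--     keywords = ["CHAIN LEAKAGE", "TOURIST TRAP", "OVERRATED", "LOW CONFIDENCE"]
--     labels = ["FLAG: CHAIN LEAKED", "FLAG: POSSIBLE TOURIST TRAP",
--               "FLAG: OVERRATED SIGNAL", "LOW CONFIDENCE", "HIGH CONFIDENCE"]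
--     best = len(keywords)
--     for f in flags:
--         best = min(best, _match_rank(f, keywords))
--     return labels[best]
-- ===== Notes on version B (the rewrite author's own statement) =====
-- stated objective: alternative
-- what changed: Replaced A's four full any()-scans of the flag list (one per keyword) by a single pass over the flags that keeps the minimum (highest-priority) keyword index matched so far, then maps that index to its label.
import Mathlib
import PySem

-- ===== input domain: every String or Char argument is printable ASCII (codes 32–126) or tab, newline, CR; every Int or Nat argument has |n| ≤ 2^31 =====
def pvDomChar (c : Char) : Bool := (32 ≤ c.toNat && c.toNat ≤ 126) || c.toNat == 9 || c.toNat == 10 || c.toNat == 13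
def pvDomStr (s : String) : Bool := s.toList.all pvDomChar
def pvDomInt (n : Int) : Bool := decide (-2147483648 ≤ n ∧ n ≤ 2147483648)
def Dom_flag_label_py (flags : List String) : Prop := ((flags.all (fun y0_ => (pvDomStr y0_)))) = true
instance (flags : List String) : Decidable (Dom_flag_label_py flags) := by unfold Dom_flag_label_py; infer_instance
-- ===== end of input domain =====

-- B replaces A's four per-keyword any()-scans of the flag list by a single pass over the
-- flags keeping the minimum matched keyword index (alternative decomposition, same cost).

-- ===== PORT A =====
-- A: four successive any()-scans of the flag list, one per keyword, in priority order.
def flag_label_py (flags : List String) : String :=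
  if flags.any (fun f => PySem.Str.isIn "CHAIN LEAKAGE" f) then "FLAG: CHAIN LEAKED"
  else if flags.any (fun f => PySem.Str.isIn "TOURIST TRAP" f) then "FLAG: POSSIBLE TOURIST TRAP"
  else if flags.any (fun f => PySem.Str.isIn "OVERRATED" f) then "FLAG: OVERRATED SIGNAL"
  else if flags.any (fun f => PySem.Str.isIn "LOW CONFIDENCE" f) then "LOW CONFIDENCE"
  else "HIGH CONFIDENCE"

-- ===== PORT B =====
-- B: one pass over the flags keeping the minimum matched keyword index; labels indexed at the end.
def pvKeywords : List String := ["CHAIN LEAKAGE", "TOURIST TRAP", "OVERRATED", "LOW CONFIDENCE"]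
def pvLabels : List String :=
  ["FLAG: CHAIN LEAKED", "FLAG: POSSIBLE TOURIST TRAP",
   "FLAG: OVERRATED SIGNAL", "LOW CONFIDENCE", "HIGH CONFIDENCE"]

-- _match_rank: index of the first keyword contained in f, or the list's length.
def pvMatchRank (f : String) : List String → Nat
  | [] => 0
  | kw :: rest => if PySem.Str.isIn kw f then 0 else 1 + pvMatchRank f rest

def flag_label_py_alt (flags : List String) : String :=
  let best := flags.foldl (fun b f => min b (pvMatchRank f pvKeywords)) pvKeywords.length
  pvLabels.getD best ""

-- ===== PRECONDITION & SPEC =====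
def Spec_flag_label_py (flags : List String) (out : String) : Prop := out = flag_label_py_alt flags
instance (flags : List String) (out : String) : Decidable (Spec_flag_label_py flags out) := by unfold Spec_flag_label_py; infer_instance

-- ===== CLAIM (what is proved, stated in full; the proofs are below) =====
def Claim_equal_flag_label_py : Prop := ∀ (flags : List String), Dom_flag_label_py flags → Spec_flag_label_py flags (flag_label_py flags)

-- ===== LEMMAS AND PROOFS =====

-- The running minimum after the fold is ≤ k iff the start value is, or some flag ranks ≤ k.
lemma foldl_min_le_iff (flags : List String) (b k : Nat) :
    flags.foldl (fun b f => min b (pvMatchRank f pvKeywords)) b ≤ k ↔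
      b ≤ k ∨ ∃ f ∈ flags, pvMatchRank f pvKeywords ≤ k := by
  induction flags generalizing b with
  | nil => simp
  | cons f fs ih =>
      simp only [List.foldl_cons, ih, List.mem_cons]
      constructor
      · rintro (h | ⟨x, hx, hr⟩)
        · by_cases hb : b ≤ k
          · exact Or.inl hb
          · exact Or.inr ⟨f, Or.inl rfl, by omega⟩
        · exact Or.inr ⟨x, Or.inr hx, hr⟩
      · rintro (h | ⟨x, rfl | hx, hr⟩)
        · exact Or.inl (by omega)
        · exact Or.inl (by omega)
        · exact Or.inr ⟨x, hx, hr⟩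

lemma rank_le_0 (f : String) :
    pvMatchRank f pvKeywords ≤ 0 ↔ PySem.Str.isIn "CHAIN LEAKAGE" f = true := by
  simp only [pvKeywords, pvMatchRank]; split_ifs <;> simp_all <;> omega

lemma rank_le_1 (f : String) :
    pvMatchRank f pvKeywords ≤ 1 ↔
      (PySem.Str.isIn "CHAIN LEAKAGE" f = true ∨ PySem.Str.isIn "TOURIST TRAP" f = true) := by
  simp only [pvKeywords, pvMatchRank]; split_ifs <;> simp_all <;> omega

lemma rank_le_2 (f : String) :
    pvMatchRank f pvKeywords ≤ 2 ↔
      (PySem.Str.isIn "CHAIN LEAKAGE" f = true ∨ PySem.Str.isIn "TOURIST TRAP" f = true ∨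
       PySem.Str.isIn "OVERRATED" f = true) := by
  simp only [pvKeywords, pvMatchRank]; split_ifs <;> simp_all <;> omega

lemma rank_le_3 (f : String) :
    pvMatchRank f pvKeywords ≤ 3 ↔
      (PySem.Str.isIn "CHAIN LEAKAGE" f = true ∨ PySem.Str.isIn "TOURIST TRAP" f = true ∨
       PySem.Str.isIn "OVERRATED" f = true ∨ PySem.Str.isIn "LOW CONFIDENCE" f = true) := by
  simp only [pvKeywords, pvMatchRank]; split_ifs <;> simp_all <;> omega

-- ===== VERDICT (by name: the statement is the Claim_ definition above) =====
theorem flag_label_py_spec : Claim_equal_flag_label_py := by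
  intro flags _
  unfold Spec_flag_label_py flag_label_py flag_label_py_alt
  set m := flags.foldl (fun b f => min b (pvMatchRank f pvKeywords)) pvKeywords.length with hm
  have hlen : pvKeywords.length = 4 := by simp [pvKeywords]
  have h4 : m ≤ 4 := by rw [hm, foldl_min_le_iff]; exact Or.inl (by omega)
  have h0 : m ≤ 0 ↔ flags.any (fun f => PySem.Str.isIn "CHAIN LEAKAGE" f) = true := by
    rw [hm, foldl_min_le_iff]
    simp only [List.any_eq_true]
    constructor
    · rintro (h | ⟨f, hf, hr⟩)
      · omega
      · exact ⟨f, hf, (rank_le_0 f).mp hr⟩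
    · rintro ⟨f, hf, h⟩
      exact Or.inr ⟨f, hf, (rank_le_0 f).mpr h⟩
  have h1 : m ≤ 1 ↔ (flags.any (fun f => PySem.Str.isIn "CHAIN LEAKAGE" f) = true ∨
      flags.any (fun f => PySem.Str.isIn "TOURIST TRAP" f) = true) := by
    rw [hm, foldl_min_le_iff]
    simp only [List.any_eq_true]
    constructor
    · rintro (h | ⟨f, hf, hr⟩)
      · omega
      · rcases (rank_le_1 f).mp hr with h | h
        · exact Or.inl ⟨f, hf, h⟩
        · exact Or.inr ⟨f, hf, h⟩
    · rintro (⟨f, hf, h⟩ | ⟨f, hf, h⟩)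
      · exact Or.inr ⟨f, hf, (rank_le_1 f).mpr (Or.inl h)⟩
      · exact Or.inr ⟨f, hf, (rank_le_1 f).mpr (Or.inr h)⟩
  have h2 : m ≤ 2 ↔ (flags.any (fun f => PySem.Str.isIn "CHAIN LEAKAGE" f) = true ∨
      flags.any (fun f => PySem.Str.isIn "TOURIST TRAP" f) = true ∨
      flags.any (fun f => PySem.Str.isIn "OVERRATED" f) = true) := by
    rw [hm, foldl_min_le_iff]
    simp only [List.any_eq_true]
    constructor
    · rintro (h | ⟨f, hf, hr⟩)
      · omega
      · rcases (rank_le_2 f).mp hr with h | h | h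
        · exact Or.inl ⟨f, hf, h⟩
        · exact Or.inr (Or.inl ⟨f, hf, h⟩)
        · exact Or.inr (Or.inr ⟨f, hf, h⟩)
    · rintro (⟨f, hf, h⟩ | ⟨f, hf, h⟩ | ⟨f, hf, h⟩)
      · exact Or.inr ⟨f, hf, (rank_le_2 f).mpr (Or.inl h)⟩
      · exact Or.inr ⟨f, hf, (rank_le_2 f).mpr (Or.inr (Or.inl h))⟩
      · exact Or.inr ⟨f, hf, (rank_le_2 f).mpr (Or.inr (Or.inr h))⟩
  have h3 : m ≤ 3 ↔ (flags.any (fun f => PySem.Str.isIn "CHAIN LEAKAGE" f) = true ∨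
      flags.any (fun f => PySem.Str.isIn "TOURIST TRAP" f) = true ∨
      flags.any (fun f => PySem.Str.isIn "OVERRATED" f) = true ∨
      flags.any (fun f => PySem.Str.isIn "LOW CONFIDENCE" f) = true) := by
    rw [hm, foldl_min_le_iff]
    simp only [List.any_eq_true]
    constructor
    · rintro (h | ⟨f, hf, hr⟩)
      · omega
      · rcases (rank_le_3 f).mp hr with h | h | h | h
        · exact Or.inl ⟨f, hf, h⟩
        · exact Or.inr (Or.inl ⟨f, hf, h⟩)
        · exact Or.inr (Or.inr (Or.inl ⟨f, hf, h⟩))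
        · exact Or.inr (Or.inr (Or.inr ⟨f, hf, h⟩))
    · rintro (⟨f, hf, h⟩ | ⟨f, hf, h⟩ | ⟨f, hf, h⟩ | ⟨f, hf, h⟩)
      · exact Or.inr ⟨f, hf, (rank_le_3 f).mpr (Or.inl h)⟩
      · exact Or.inr ⟨f, hf, (rank_le_3 f).mpr (Or.inr (Or.inl h))⟩
      · exact Or.inr ⟨f, hf, (rank_le_3 f).mpr (Or.inr (Or.inr (Or.inl h)))⟩
      · exact Or.inr ⟨f, hf, (rank_le_3 f).mpr (Or.inr (Or.inr (Or.inr h)))⟩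
  by_cases c0 : flags.any (fun f => PySem.Str.isIn "CHAIN LEAKAGE" f) = true
  · have hm0 : m = 0 := by have := h0.mpr c0; omega
    rw [if_pos c0]; simp [hm0, pvLabels]
  · by_cases c1 : flags.any (fun f => PySem.Str.isIn "TOURIST TRAP" f) = true
    · have hm1 : m = 1 := by
        have := h1.mpr (Or.inr c1)
        have hn : ¬ m ≤ 0 := fun h => c0 (h0.mp h)
        omega
      rw [if_neg c0, if_pos c1]; simp [hm1, pvLabels]
    · by_cases c2 : flags.any (fun f => PySem.Str.isIn "OVERRATED" f) = true
      · have hm2 : m = 2 := by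
          have := h2.mpr (Or.inr (Or.inr c2))
          have hn : ¬ m ≤ 1 := fun h => (h1.mp h).elim c0 c1
          omega
        rw [if_neg c0, if_neg c1, if_pos c2]; simp [hm2, pvLabels]
      · by_cases c3 : flags.any (fun f => PySem.Str.isIn "LOW CONFIDENCE" f) = true
        · have hm3 : m = 3 := by
            have := h3.mpr (Or.inr (Or.inr (Or.inr c3)))
            have hn : ¬ m ≤ 2 := fun h => (h2.mp h).elim c0 (fun h => h.elim c1 c2)
            omega
          rw [if_neg c0, if_neg c1, if_neg c2, if_pos c3]; simp [hm3, pvLabels]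
        · have hm4 : m = 4 := by
            have hn : ¬ m ≤ 3 := fun h => (h3.mp h).elim c0 (fun h => h.elim c1 (fun h => h.elim c2 c3))
            omega
          rw [if_neg c0, if_neg c1, if_neg c2, if_neg c3]; simp [hm4, pvLabels]
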